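-- pv_equiv track=rewrite | github.com/fiacrerougieux/helio | agent/deterministic_reducer.py | _find_optimal_variant
-- ===== SOURCE A (Python) =====
-- from typing import Dict, List, Any, Optional
--
-- def _find_optimal_variant(variant_results: List[Dict[str, Any]],
--                          metric: str, criterion: str) -> int:
--     """Find index of optimal variant based on criterion."""
--     metric_values = []
--     for result in variant_results:
--         if metric not in result:
--             raise ValueError(f"Metric {metric} not found in result")
--         metric_values.append(result[metric])
--
--     if criterion == "maximize":
--         return metric_values.index(max(metric_values))
--     elif criterion == "minimize":
--         return metric_values.index(min(metric_values))
--     else: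
--         raise ValueError(f"Unknown optimal criterion: {criterion}")
-- ===== SOURCE B (Python) =====
-- def _find_optimal_variant(variant_results, metric, criterion):
--     """Find index of optimal variant: single pass tracking the running best."""
--     if criterion == "maximize":
--         better = lambda a, b: a > b
--     elif criterion == "minimize":
--         better = lambda a, b: a < b
--     else:
--         raise ValueError(f"Unknown optimal criterion: {criterion}")
--     best_index = None
--     best_value = None
--     for i, result in enumerate(variant_results):
--         if metric not in result:
--             raise ValueError(f"Metric {metric} not found in result")
--         v = result[metric]
--         if best_index is None or better(v, best_value):
--             best_index, best_value = i, v
--     if best_index is None: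
--         raise ValueError("empty variant_results")
--     return best_index
-- ===== Notes on version B (the rewrite author's own statement) =====
-- stated objective: alternative
-- what changed: Replaces A's three passes (collect values, max/min, then list.index re-scan) with a single enumerate pass that tracks the best index and value, updating only on a strictly better value so the first occurrence wins ties.
import Mathlib
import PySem

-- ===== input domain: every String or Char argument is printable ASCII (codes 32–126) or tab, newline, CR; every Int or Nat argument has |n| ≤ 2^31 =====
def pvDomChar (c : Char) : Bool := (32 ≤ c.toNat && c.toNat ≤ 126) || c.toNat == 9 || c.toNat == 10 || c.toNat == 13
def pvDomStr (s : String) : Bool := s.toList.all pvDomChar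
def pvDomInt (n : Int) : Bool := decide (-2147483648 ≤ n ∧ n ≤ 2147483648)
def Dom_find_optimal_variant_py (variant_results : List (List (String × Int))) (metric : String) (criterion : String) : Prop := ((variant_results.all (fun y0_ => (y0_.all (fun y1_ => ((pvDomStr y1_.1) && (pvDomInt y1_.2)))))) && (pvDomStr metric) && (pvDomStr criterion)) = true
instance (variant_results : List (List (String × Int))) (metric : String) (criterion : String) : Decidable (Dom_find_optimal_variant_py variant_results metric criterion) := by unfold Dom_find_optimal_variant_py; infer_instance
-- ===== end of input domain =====

-- ===== PORT A =====
-- B replaces A's three passes (collect, max/min, .index re-scan) with one running-best pass; equal on all non-raising inputs.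
-- first-match association lookup = Python dict lookup (generated dicts have unique keys)
def pvLookup (r : List (String × Int)) (k : String) : Option Int :=
  List.lookup k r

-- port of A: build metric_values by the append loop, then index of max/min.
-- a `none` lookup is Python's ValueError (excluded by Pre_); 0 is a placeholder never reached under Pre_.
def find_optimal_variant_py (variant_results : List (List (String × Int))) (metric : String) (criterion : String) : Int :=
  let metric_values : List Int :=
    variant_results.foldl (fun acc r => acc ++ [(pvLookup r metric).getD 0]) []
  if criterion = "maximize" then
    match PySem.List.max? metric_values (fun x => x) with
    | some m => (((PySem.List.index? metric_values m).getD 0 : Nat) : Int)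
    | none => 0
  else if criterion = "minimize" then
    match PySem.List.min? metric_values (fun x => x) with
    | some m => (((PySem.List.index? metric_values m).getD 0 : Nat) : Int)
    | none => 0
  else 0

-- ===== PORT B =====
-- the single enumerate pass of Source B: acc = none (best_index is None) or some (best_index, best_value)
def pvBest (better : Int → Int → Bool) (metric : String)
    (variant_results : List (List (String × Int))) : Option (Int × Int) :=
  (PySem.List.enumerate variant_results 0).foldl
    (fun acc p =>
      let v := (pvLookup p.2 metric).getD 0
      match acc with
      | none => some (p.1, v)
      | some (bi, bv) => if better v bv then some (p.1, v) else some (bi, bv))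
    none

-- `best_index is None` after the loop is Python's ValueError (excluded by Pre_)
def pvFinish : Option (Int × Int) → Int
  | some (bi, _) => bi
  | none => 0

def find_optimal_variant_py_alt (variant_results : List (List (String × Int))) (metric : String) (criterion : String) : Int :=
  if criterion = "maximize" then
    pvFinish (pvBest (fun a b => decide (b < a)) metric variant_results)
  else if criterion = "minimize" then
    pvFinish (pvBest (fun a b => decide (a < b)) metric variant_results)
  else 0

-- ===== PRECONDITION & SPEC =====
-- Pre_ excludes exactly the inputs on which A raises ValueError: a missing metric key,
-- a criterion other than "maximize"/"minimize", or an empty variant list (max/min of []).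
def Pre_find_optimal_variant_py (variant_results : List (List (String × Int))) (metric : String) (criterion : String) : Prop :=
  variant_results ≠ [] ∧
  (criterion = "maximize" ∨ criterion = "minimize") ∧
  ∀ r ∈ variant_results, (pvLookup r metric).isSome

instance (variant_results : List (List (String × Int))) (metric : String) (criterion : String) : Decidable (Pre_find_optimal_variant_py variant_results metric criterion) := by
  unfold Pre_find_optimal_variant_py; infer_instance

def pvWitness_find_optimal_variant_py : (List (List (String × Int))) × String × String :=
  ([[("m", 3)], [("m", 5)], [("m", 5)]], "m", "maximize")

def Spec_find_optimal_variant_py (variant_results : List (List (String × Int))) (metric : String) (criterion : String) (out : Int) : Prop := out = find_optimal_variant_py_alt variant_results metric criterion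
instance (variant_results : List (List (String × Int))) (metric : String) (criterion : String) (out : Int) : Decidable (Spec_find_optimal_variant_py variant_results metric criterion out) := by unfold Spec_find_optimal_variant_py; infer_instance

-- ===== CLAIM (what is proved, stated in full; the proofs are below) =====
def Claim_equal_find_optimal_variant_py : Prop := ∀ (variant_results : List (List (String × Int))) (metric : String) (criterion : String), Dom_find_optimal_variant_py variant_results metric criterion → Pre_find_optimal_variant_py variant_results metric criterion → Spec_find_optimal_variant_py variant_results metric criterion (find_optimal_variant_py variant_results metric criterion)

-- ===== LEMMAS AND PROOFS =====

-- enumerate commutes with map on the payload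
theorem pv_enumerate_map {α β : Type} (f : α → β) (l : List α) (s : Int) :
    PySem.List.enumerate (l.map f) s = (PySem.List.enumerate l s).map (fun p => (p.1, f p.2)) := by
  induction l generalizing s with
  | nil => simp [PySem.List.enumerate_nil]
  | cons x t ih => simp [PySem.List.enumerate_cons, ih]

-- the generic running-best loop over a plain value list
def pvRun (better : Int → Int → Bool) (vs : List Int) : Option (Int × Int) :=
  (PySem.List.enumerate vs 0).foldl
    (fun acc p =>
      match acc with
      | none => some p
      | some (bi, bv) => if better p.2 bv then some p else some (bi, bv))
    none

theorem pvBest_eq_pvRun (better : Int → Int → Bool) (metric : String)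
    (vr : List (List (String × Int))) :
    pvBest better metric vr = pvRun better (vr.map (fun r => (pvLookup r metric).getD 0)) := by
  unfold pvBest pvRun
  rw [pv_enumerate_map, List.foldl_map]

-- invariant of the running-best loop: it returns the first index achieving the optimum
theorem pvRun_spec (better : Int → Int → Bool)
    (Hirr : ∀ a, better a a = false)
    (Hasym : ∀ a b, better a b = true → better b a = false)
    (Htr : ∀ a b c, better a b = false → better c b = true → better c a = true)
    (vs : List Int) (hne : vs ≠ []) :
    ∃ (k : Nat) (hk : k < vs.length),
      pvRun better vs = some ((k : Int), vs[k]) ∧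
      (∀ j (hj : j < vs.length), better vs[j] vs[k] = false) ∧
      (∀ j (hj : j < k), better vs[k] (vs[j]'(by omega)) = true) := by
  induction vs using List.reverseRecOn with
  | nil => exact absurd rfl hne
  | append_singleton vs' v ih =>
    have hstep : pvRun better (vs' ++ [v]) =
        (match pvRun better vs' with
         | none => some ((vs'.length : Int), v)
         | some (bi, bv) => if better v bv then some ((vs'.length : Int), v) else some (bi, bv)) := by
      unfold pvRun
      rw [PySem.List.enumerate_append, List.foldl_append]
      simp [PySem.List.enumerate_cons, PySem.List.enumerate_nil]
    by_cases h0 : vs' = []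
    · subst h0
      refine ⟨0, by simp, ?_, ?_, ?_⟩
      · simp [pvRun, PySem.List.enumerate_cons, PySem.List.enumerate_nil]
      · intro j hj
        have hj0 : j = 0 := by simpa using hj
        subst hj0
        simp [Hirr]
      · intro j hj; omega
    · obtain ⟨k, hk, hrun, h1, h2⟩ := ih h0
      have hlenlt : vs'.length < (vs' ++ [v]).length := by simp
      have elast : (vs' ++ [v])[vs'.length]'hlenlt = v := by simp
      by_cases hb : better v vs'[k] = true
      · refine ⟨vs'.length, hlenlt, ?_, ?_, ?_⟩
        · rw [hstep, hrun]
          simp [hb, elast]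
        · intro j hj
          rcases Nat.lt_or_ge j vs'.length with hj' | hj'
          · rw [List.getElem_append_left hj', elast]
            exact Hasym _ _ (Htr _ _ _ (h1 j hj') hb)
          · have hje : j = vs'.length := by simp at hj; omega
            subst hje
            rw [elast]
            exact Hirr v
        · intro j hj
          have hj' : j < vs'.length := hj
          rw [List.getElem_append_left hj', elast]
          exact Htr _ _ _ (h1 j hj') hb
      · have hk' : k < (vs' ++ [v]).length := by simp; omega
        refine ⟨k, hk', ?_, ?_, ?_⟩
        · rw [hstep, hrun]
          simp only [hb, Bool.false_eq_true, if_false]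
          rw [List.getElem_append_left hk]
        · intro j hj
          rw [List.getElem_append_left hk]
          rcases Nat.lt_or_ge j vs'.length with hj' | hj'
          · rw [List.getElem_append_left hj']
            exact h1 j hj'
          · have hje : j = vs'.length := by simp at hj; omega
            subst hje
            rw [elast]
            simpa using hb
        · intro j hj
          have hj' : j < vs'.length := by omega
          rw [List.getElem_append_left hk, List.getElem_append_left hj']
          exact h2 j hj

-- A's index?-of-extremum equals the loop's first-optimum index
theorem pv_index_eq (better : Int → Int → Bool) (vs : List Int) (m : Int)
    (Hconn : ∀ a b : Int, better a b = false → better b a = false → a = b)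
    (hmem : m ∈ vs)
    (hbest : ∀ y ∈ vs, better y m = false)
    (k : Nat) (hk : k < vs.length)
    (h1 : ∀ j (hj : j < vs.length), better vs[j] vs[k] = false)
    (h2 : ∀ j (hj : j < k), better vs[k] (vs[j]'(by omega)) = true) :
    PySem.List.index? vs m = some k := by
  have hsome : (PySem.List.index? vs m).isSome = true := (PySem.List.index?_isSome_iff vs m).mpr hmem
  obtain ⟨k0, hk0⟩ : ∃ k0, PySem.List.index? vs m = some k0 := Option.isSome_iff_exists.mp hsome
  obtain ⟨hk0lt, hv0, hpre⟩ := PySem.List.getElem_of_index?_eq_some hk0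
  -- vs[k0] = m and vs[k] = m
  have hmk : vs[k] = m := by
    have ha := hbest vs[k] (List.getElem_mem hk)
    have hb := h1 k0 hk0lt
    rw [hv0] at hb
    exact Hconn _ _ ha hb
  have : k0 = k := by
    rcases Nat.lt_trichotomy k0 k with h | h | h
    · have := h2 k0 h
      rw [hv0, hmk] at this
      have := hbest m hmem
      simp_all
    · exact h
    · have := hpre k h
      rw [hmk] at this
      exact absurd rfl this
  rw [hk0, this]

-- the collection loop of A is just map
theorem pv_values_eq (vr : List (List (String × Int))) (metric : String) :
    vr.foldl (fun acc r => acc ++ [(pvLookup r metric).getD 0]) [] =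
      vr.map (fun r => (pvLookup r metric).getD 0) := by
  simpa using PySem.List.foldl_append_singleton_eq_map (f := fun r => (pvLookup r metric).getD 0) (l := vr) []

-- ===== VERDICT (by name: the statement is the Claim_ definition above) =====
theorem find_optimal_variant_py_spec : Claim_equal_find_optimal_variant_py := by
  intro vr metric criterion _ hpre
  obtain ⟨hne, hcrit, _⟩ := hpre
  unfold Spec_find_optimal_variant_py find_optimal_variant_py find_optimal_variant_py_alt
  set vs : List Int := vr.map (fun r => (pvLookup r metric).getD 0) with hvs
  have hvne : vs ≠ [] := by simpa [hvs] using hne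
  rcases hcrit with hc | hc <;> subst hc
  · -- maximize
    rw [if_pos rfl, if_pos rfl, pv_values_eq, ← hvs, pvBest_eq_pvRun, ← hvs]
    obtain ⟨k, hk, hrun, h1, h2⟩ := pvRun_spec (fun a b => decide (b < a))
      (fun a => by simp)
      (fun a b h => by simp at h ⊢; omega)
      (fun a b c ha hb => by simp at ha hb ⊢; omega) vs hvne
    rw [hrun]
    obtain ⟨m, hm⟩ : ∃ m, PySem.List.max? vs (fun x => x) = some m := by
      rcases h : PySem.List.max? vs (fun x => x) with _ | m
      · exact absurd ((PySem.List.max?_eq_none_iff _ _).mp h) hvne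
      · exact ⟨m, rfl⟩
    have hidx : PySem.List.index? vs m = some k := by
      refine pv_index_eq (fun a b => decide (b < a)) vs m (fun a b ha hb => by simp at ha hb; omega)
        (PySem.List.max?_mem hm) ?_ k hk h1 h2
      intro y hy
      have := PySem.List.max?_isMax hm y hy
      simp_all
    rw [hm]
    show ((PySem.List.index? vs m).getD 0 : Nat) = pvFinish (some ((k : Int), vs[k]))
    rw [hidx]
    simp [pvFinish]
  · -- minimize
    rw [if_neg (show ("minimize" : String) ≠ "maximize" by decide), if_pos rfl,
        if_neg (show ("minimize" : String) ≠ "maximize" by decide), if_pos rfl,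
        pv_values_eq, ← hvs, pvBest_eq_pvRun, ← hvs]
    obtain ⟨k, hk, hrun, h1, h2⟩ := pvRun_spec (fun a b => decide (a < b))
      (fun a => by simp)
      (fun a b h => by simp at h ⊢; omega)
      (fun a b c ha hb => by simp at ha hb ⊢; omega) vs hvne
    rw [hrun]
    obtain ⟨m, hm⟩ : ∃ m, PySem.List.min? vs (fun x => x) = some m := by
      rcases h : PySem.List.min? vs (fun x => x) with _ | m
      · exact absurd ((PySem.List.min?_eq_none_iff _ _).mp h) hvne
      · exact ⟨m, rfl⟩
    have hidx : PySem.List.index? vs m = some k := by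
      refine pv_index_eq (fun a b => decide (a < b)) vs m (fun a b ha hb => by simp at ha hb; omega)
        (PySem.List.min?_mem hm) ?_ k hk h1 h2
      intro y hy
      have := PySem.List.min?_isMin hm y hy
      simp_all
    rw [hm]
    show ((PySem.List.index? vs m).getD 0 : Nat) = pvFinish (some ((k : Int), vs[k]))
    rw [hidx]
    simp [pvFinish]
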